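-- pv_equiv track=rewrite | github.com/jack139/CBLUE2 | CDN/baseline/text_process.py | clean_index
-- ===== SOURCE A (Python) =====
-- def clean_index(string):
--     # 1. 2.
--     new_string = ""
--     idx = 0
--     while idx < len(string):
--         ch = string[idx]
--         if "1" <= ch <= "9" and idx < len(string) - 1 and string[idx + 1] == ".":
--             if ch!= "1":
--                 new_string += "，"
--             else:
--                 new_string += " "
--             idx += 1
--         else:
--             new_string += ch
--         idx += 1
--     return new_string
-- ===== SOURCE B (Python) =====
-- def clean_index(string):
--     # Split on '.'; every piece except the last was followed by a dot.
--     # If such a piece ends with a digit 1-9, the digit+dot pair becomes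
--     # ' ' (for '1') or '，' (for 2-9); otherwise the dot is restored.
--     parts = string.split(".")
--     out = []
--     for piece in parts[:-1]:
--         if piece and "1" <= piece[-1] <= "9":
--             out.append(piece[:-1] + (" " if piece[-1] == "1" else "，"))
--         else:
--             out.append(piece + ".")
--     out.append(parts[-1])
--     return "".join(out)
-- ===== Notes on version B (the rewrite author's own statement) =====
-- stated objective: faster
-- what changed: A's manual index loop with dot-skipping idx bookkeeping and repeated string concatenation is replaced by split on the dot character, transform each piece (a piece ending in a digit one to nine has digit plus dot rewritten to the replacement character, otherwise the dot is restored), then join once.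
import Mathlib
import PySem

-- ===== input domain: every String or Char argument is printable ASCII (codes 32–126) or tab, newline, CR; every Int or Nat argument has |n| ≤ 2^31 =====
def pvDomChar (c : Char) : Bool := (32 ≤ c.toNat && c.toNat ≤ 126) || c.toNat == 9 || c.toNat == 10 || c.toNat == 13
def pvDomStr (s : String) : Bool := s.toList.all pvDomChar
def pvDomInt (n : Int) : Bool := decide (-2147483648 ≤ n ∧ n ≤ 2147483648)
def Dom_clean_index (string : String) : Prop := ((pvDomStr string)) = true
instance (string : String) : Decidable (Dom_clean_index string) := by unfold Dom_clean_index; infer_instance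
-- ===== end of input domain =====

-- B replaces A's index-bookkeeping scan by split-on-'.'/transform-pieces/join (simpler decomposition, same cost).

-- ===== PORT A =====
-- A's while loop over idx, transliterated as structural recursion on the character list:
-- the two-chars-available case is the branch where idx < len-1 holds.
def pvCleanA : List Char → List Char
  | [] => []
  | [ch] => [ch]
  | ch :: c2 :: rest =>
      if ('1' ≤ ch ∧ ch ≤ '9') ∧ c2 = '.' then
        (if ch ≠ '1' then '，' else ' ') :: pvCleanA rest
      else
        ch :: pvCleanA (c2 :: rest)

def clean_index (string : String) : String := String.mk (pvCleanA string.toList)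

-- ===== PORT B =====
-- B's per-piece transform: pieces other than the last were followed by '.'.
def pvPiece (p : List Char) : List Char :=
  match p.getLast? with
  | some d => if '1' ≤ d ∧ d ≤ '9' then p.dropLast ++ [if d = '1' then ' ' else '，'] else p ++ ['.']
  | none => p ++ ['.']

-- string.split(".") is ported as List.splitOn '.' (single-character separator); ''.join = flatten.
def pvCleanB (l : List Char) : List Char :=
  let parts := l.splitOn '.'
  (parts.dropLast.map pvPiece ++ [parts.getLastD []]).flatten

def clean_index_alt (string : String) : String := String.mk (pvCleanB string.toList)

-- ===== PRECONDITION & SPEC =====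
def Spec_clean_index (string : String) (out : String) : Prop := out = clean_index_alt string
instance (string : String) (out : String) : Decidable (Spec_clean_index string out) := by unfold Spec_clean_index; infer_instance

-- ===== CLAIM (what is proved, stated in full; the proofs are below) =====
def Claim_equal_clean_index : Prop := ∀ (string : String), Dom_clean_index string → Spec_clean_index string (clean_index string)

-- ===== LEMMAS AND PROOFS =====

theorem pvSplitOn_cons_dot (r : List Char) :
    ('.' :: r).splitOn '.' = [] :: r.splitOn '.' := by
  simp [List.splitOn, List.splitOnP_cons]

theorem pvSplitOn_cons_ne {c : Char} (hc : c ≠ '.') (r : List Char) :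
    (c :: r).splitOn '.' = (r.splitOn '.').modifyHead (List.cons c) := by
  simp [List.splitOn, List.splitOnP_cons, hc]

theorem pvSplitOn_ne_nil (r : List Char) : r.splitOn '.' ≠ [] := by
  simp [List.splitOn]; exact List.splitOnP_ne_nil _ _

theorem pvPiece_cons (c x : Char) (xs : List Char) :
    pvPiece (c :: x :: xs) = c :: pvPiece (x :: xs) := by
  simp only [pvPiece, List.getLast?_cons_cons]
  cases h : (x :: xs).getLast? with
  | none => simp at h
  | some d =>
      by_cases hd : '1' ≤ d ∧ d ≤ '9' <;>
        simp [hd, List.dropLast_cons_of_ne_nil]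

theorem pvCleanB_nil : pvCleanB [] = [] := by decide

theorem pvCleanB_dot (r : List Char) : pvCleanB ('.' :: r) = '.' :: pvCleanB r := by
  unfold pvCleanB
  rw [pvSplitOn_cons_dot]
  obtain ⟨p, S, hS⟩ := List.exists_cons_of_ne_nil (pvSplitOn_ne_nil r)
  rw [hS]
  cases S <;> simp [pvPiece]

theorem pvCleanB_cons_dot {c : Char} (hc : c ≠ '.') (r : List Char) :
    pvCleanB (c :: '.' :: r) = pvPiece [c] ++ pvCleanB r := by
  unfold pvCleanB
  rw [pvSplitOn_cons_ne hc, pvSplitOn_cons_dot]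
  obtain ⟨p, S, hS⟩ := List.exists_cons_of_ne_nil (pvSplitOn_ne_nil r)
  rw [hS]
  cases S <;> simp

theorem pvCleanB_cons_cons {c d : Char} (hc : c ≠ '.') (hd : d ≠ '.') (r : List Char) :
    pvCleanB (c :: d :: r) = c :: pvCleanB (d :: r) := by
  unfold pvCleanB
  rw [pvSplitOn_cons_ne hc, pvSplitOn_cons_ne hd]
  obtain ⟨p, S, hS⟩ := List.exists_cons_of_ne_nil (pvSplitOn_ne_nil r)
  rw [hS]
  cases S with
  | nil => simp
  | cons q T => simp [pvPiece_cons]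

theorem pvCleanB_singleton (c : Char) : pvCleanB [c] = [c] := by
  by_cases hc : c = '.'
  · subst hc; rw [pvCleanB_dot, pvCleanB_nil]
  · unfold pvCleanB
    rw [pvSplitOn_cons_ne hc]
    simp [List.splitOn]

theorem pvClean_eq (l : List Char) : pvCleanA l = pvCleanB l := by
  induction l using pvCleanA.induct with
  | case1 => rw [pvCleanB_nil]; rfl
  | case2 ch => rw [pvCleanB_singleton]; rfl
  | case3 ch c2 rest hcond ih =>
      obtain ⟨⟨h1, h9⟩, hdot⟩ := hcond
      subst hdot
      have hch : ch ≠ '.' := by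
        intro h; subst h; exact absurd h1 (by decide)
      rw [pvCleanA, if_pos ⟨⟨h1, h9⟩, rfl⟩, pvCleanB_cons_dot hch, ih]
      have : pvPiece [ch] = [if ch = '1' then ' ' else '，'] := by
        simp [pvPiece, h1, h9]
      rw [this]
      by_cases h1' : ch = '1' <;> simp [h1']
  | case4 ch c2 rest hcond ih =>
      rw [pvCleanA, if_neg hcond, ih]
      by_cases hch : ch = '.'
      · subst hch; rw [pvCleanB_dot]
      · by_cases hc2 : c2 = '.'
        · subst hc2
          have hnd : ¬ ('1' ≤ ch ∧ ch ≤ '9') := by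
            intro h; exact hcond ⟨h, rfl⟩
          rw [pvCleanB_cons_dot hch, pvCleanB_dot]
          simp [pvPiece, hnd]
        · rw [pvCleanB_cons_cons hch hc2]

-- ===== VERDICT (by name: the statement is the Claim_ definition above) =====
theorem clean_index_spec : Claim_equal_clean_index := by
  intro s _
  unfold Spec_clean_index clean_index clean_index_alt
  rw [pvClean_eq]
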